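-- pv_equiv track=rewrite | github.com/junnkkxxh/algorithm.py | junnkk/programmers/level2/42586.py | solution
-- ===== SOURCE A (Python) =====
-- import math
--
-- def solution(progresses, speeds):
--     answer = []
--     temp = []
--
--     progresses = [100-p for p in progresses]
--
--     for i in range(len(progresses)):
--         progresses[i] = math.ceil(progresses[i]/speeds[i])
--
--     for i in range(len(progresses)):
--         if len(temp) == 0:
--             temp.append(progresses[i])
--         else:
--             if temp[0] < progresses[i]:
--                 answer.append(len(temp))
--                 temp = []
--                 temp.append(progresses[i])
--             else:
--                 temp.append(progresses[i])
--
--     if temp: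
--         answer.append(len(temp))
--
--     return answer
-- ===== SOURCE B (Python) =====
-- import math
--
-- def solution(progresses, speeds):
--     days = [math.ceil((100 - p) / s) for p, s in zip(progresses, speeds)]
--     # stage 1: running maximum ("current leader's day") at each position
--     lead = []
--     m = None
--     for d in days:
--         if m is None or d > m:
--             m = d
--         lead.append(m)
--     # stage 2: run-length encode the running-maximum sequence;
--     # a batch starts exactly where the running maximum strictly increases
--     answer = []
--     prev = None
--     for v in lead:
--         if answer and v == prev:
--             answer[-1] += 1
--         else:
--             answer.append(1)
--         prev = v
--     return answer
-- ===== Notes on version B (the rewrite author's own statement) =====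
-- stated objective: alternative
-- what changed: Replaces A's greedy accumulate-and-flush temp list with a record-based two-stage algorithm: first compute the running maximum of the per-task day sequence (a batch starts exactly where the running maximum strictly increases), then run-length encode that sequence; days themselves come from one zip comprehension instead of A's map-then-in-place-rewrite loops.
import Mathlib
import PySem

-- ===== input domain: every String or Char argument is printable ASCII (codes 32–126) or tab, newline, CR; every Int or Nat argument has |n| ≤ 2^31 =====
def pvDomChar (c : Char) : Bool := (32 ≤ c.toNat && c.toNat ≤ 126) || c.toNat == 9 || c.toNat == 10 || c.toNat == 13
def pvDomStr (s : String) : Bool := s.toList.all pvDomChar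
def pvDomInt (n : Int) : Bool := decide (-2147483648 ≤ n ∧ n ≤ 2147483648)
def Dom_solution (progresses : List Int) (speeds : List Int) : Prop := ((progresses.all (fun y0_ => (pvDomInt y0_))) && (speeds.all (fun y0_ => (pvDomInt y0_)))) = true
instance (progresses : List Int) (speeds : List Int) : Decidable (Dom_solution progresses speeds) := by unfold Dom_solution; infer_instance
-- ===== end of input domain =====

-- B replaces A's greedy accumulate-and-flush temp list by a record-based two-stage pass:
-- running maximum of the day sequence, then run-length encoding of it (objective: alternative).

-- math.ceil(a/s) for ints: exact as -((-a) // s) on the stated domain (|ints| ≤ 2^31: the correctly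
-- rounded float quotient of such ints cannot cross an integer, checked in the analysis).
def pyCeilDiv (a s : Int) : Int := -(PySem.Int.floordiv (-a) s)

-- ===== PORT A =====
-- the second Python loop rewrites progresses[i] in place; each index is independent, so it is the map below
def loopA : List Int → List Int × List Int → List Int × List Int
  | [], st => st
  | d :: ds, (ans, temp) =>
    if temp.length = 0 then loopA ds (ans, temp ++ [d])
    else if PySem.List.pyGetD temp 0 0 < d then loopA ds (ans ++ [(temp.length : Int)], [] ++ [d])
    else loopA ds (ans, temp ++ [d])

def solution (progresses : List Int) (speeds : List Int) : List Int :=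
  let p1 := progresses.map (fun p => 100 - p)
  let days := (List.range p1.length).map
    (fun (i : Nat) => pyCeilDiv (PySem.List.pyGetD p1 ((i : Nat) : Int) 0) (PySem.List.pyGetD speeds ((i : Nat) : Int) 0))
  let st := loopA days ([], [])
  if st.2 ≠ [] then st.1 ++ [(st.2.length : Int)] else st.1

-- ===== PORT B =====
-- stage 1: lead.append(m) with m the running maximum (None at the start)
def leadLoop : List Int → Option Int × List Int → Option Int × List Int
  | [], st => st
  | d :: ds, (m, lead) =>
    let m' : Int := match m with
      | none => d
      | some mv => if d > mv then d else mv
    leadLoop ds (some m', lead ++ [m'])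

-- stage 2: run-length encode: answer[-1] += 1 while v equals prev, else append 1
def rleLoop : List Int → Option Int → List Int → List Int
  | [], _, ans => ans
  | v :: vs, prev, ans =>
    if ans ≠ [] ∧ some v = prev then
      rleLoop vs (some v) (ans.dropLast ++ [PySem.List.pyGetD ans (-1) 0 + 1])
    else rleLoop vs (some v) (ans ++ [1])

def solution_alt (progresses : List Int) (speeds : List Int) : List Int :=
  let days := (progresses.zip speeds).map (fun ps => pyCeilDiv (100 - ps.1) ps.2)
  let lead := (leadLoop days (none, [])).2
  rleLoop lead none []

-- ===== PRECONDITION & SPEC =====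
-- Pre_ excludes exactly the inputs on which the Python A raises: IndexError when speeds is
-- shorter than progresses, ZeroDivisionError when a used speed is 0.
def Pre_solution (progresses : List Int) (speeds : List Int) : Prop :=
  progresses.length ≤ speeds.length ∧ ∀ x ∈ speeds.take progresses.length, x ≠ 0
instance (progresses : List Int) (speeds : List Int) : Decidable (Pre_solution progresses speeds) := by
  unfold Pre_solution; infer_instance

def pvWitness_solution : List Int × List Int := ([93, 30, 55], [1, 30, 5])

def Spec_solution (progresses : List Int) (speeds : List Int) (out : List Int) : Prop := out = solution_alt progresses speeds
instance (progresses : List Int) (speeds : List Int) (out : List Int) : Decidable (Spec_solution progresses speeds out) := by unfold Spec_solution; infer_instance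

-- ===== CLAIM (what is proved, stated in full; the proofs are below) =====
def Claim_equal_solution : Prop := ∀ (progresses : List Int) (speeds : List Int), Dom_solution progresses speeds → Pre_solution progresses speeds → Spec_solution progresses speeds (solution progresses speeds)

-- ===== LEMMAS AND PROOFS =====

-- reference function both sides are reduced to
def takeLen (d : Int) : List Int → Nat
  | [] => 0
  | x :: xs => if x ≤ d then takeLen d xs + 1 else 0

def groupLens : List Int → List Int
  | [] => []
  | d :: ds => ((takeLen d ds : Int) + 1) :: groupLens (ds.drop (takeLen d ds))
termination_by l => l.length
decreasing_by simp [List.length_drop]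

theorem groupLens_nil : groupLens [] = [] := by rw [groupLens.eq_def]

theorem groupLens_cons (d : Int) (ds : List Int) :
    groupLens (d :: ds) = ((takeLen d ds : Int) + 1) :: groupLens (ds.drop (takeLen d ds)) := by
  rw [groupLens.eq_def]

def finalizeA (st : List Int × List Int) : List Int :=
  if st.2 ≠ [] then st.1 ++ [(st.2.length : Int)] else st.1

theorem loopA_nonempty (ds : List Int) : ∀ (ans ts : List Int) (t0 : Int),
    finalizeA (loopA ds (ans, t0 :: ts)) =
      ans ++ (((ts.length + 1 + takeLen t0 ds : Nat) : Int) :: groupLens (ds.drop (takeLen t0 ds))) := by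
  induction ds with
  | nil =>
    intro ans ts t0
    simp [loopA, finalizeA, takeLen, groupLens_nil]
  | cons d ds ih =>
    intro ans ts t0
    by_cases hd : t0 < d
    · have hnle : ¬ d ≤ t0 := by omega
      simp only [loopA, List.length_cons, PySem.List.pyGetD_zero_cons,
        Nat.succ_ne_zero, if_false, hd, if_true, List.nil_append]
      rw [ih (ans ++ [((ts.length + 1 : Nat) : Int)]) [] d]
      simp only [takeLen, if_neg hnle, List.drop_zero, groupLens_cons,
        List.append_assoc, List.singleton_append]
      congr 3 <;> simp only [List.length_nil] <;> push_cast <;> omega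
    · have hle : d ≤ t0 := by omega
      simp only [loopA, List.length_cons, PySem.List.pyGetD_zero_cons,
        Nat.succ_ne_zero, if_false, hd, if_false]
      have hcons : (t0 :: ts) ++ [d] = t0 :: (ts ++ [d]) := by simp
      rw [hcons, ih ans (ts ++ [d]) t0]
      simp only [takeLen, if_pos hle, List.drop_succ_cons, List.length_append,
        List.length_singleton]
      congr 2 <;> push_cast <;> omega

theorem loopA_eq_groupLens (days : List Int) :
    finalizeA (loopA days ([], [])) = groupLens days := by
  cases days with
  | nil => simp [loopA, finalizeA, groupLens_nil]
  | cons d ds =>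
    simp only [loopA, List.length_nil, if_true, List.nil_append]
    rw [loopA_nonempty ds [] [] d, groupLens_cons]
    simp only [List.nil_append]
    congr 2 <;> simp only [List.length_nil] <;> push_cast <;> omega

-- the running-maximum tail starting from current maximum m
def pm : Int → List Int → List Int
  | _, [] => []
  | m, x :: xs => (if x > m then x else m) :: pm (if x > m then x else m) xs

theorem leadLoop_snd (ds : List Int) : ∀ (m : Int) (acc : List Int),
    (leadLoop ds (some m, acc)).2 = acc ++ pm m ds := by
  induction ds with
  | nil => intro m acc; simp [leadLoop, pm]
  | cons d ds ih =>
    intro m acc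
    simp only [leadLoop, pm]
    rw [ih]
    simp

-- the run-length counts produced by rleLoop from a pending run (value p, count c)
def runMerge : Int → Int → List Int → List Int
  | _, c, [] => [c]
  | p, c, v :: vs => if v = p then runMerge p (c + 1) vs else c :: runMerge v 1 vs

theorem rleLoop_inv (vs : List Int) : ∀ (p c : Int) (done : List Int),
    rleLoop vs (some p) (done ++ [c]) = done ++ runMerge p c vs := by
  induction vs with
  | nil => intro p c done; simp [rleLoop, runMerge]
  | cons v vs ih =>
    intro p c done
    by_cases hv : v = p
    · simp only [rleLoop, runMerge, hv]
      have hne : done ++ [c] ≠ [] := by simp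
      simp only [hne, ne_eq, not_false_iff, true_and,
        List.dropLast_concat, PySem.List.pyGetD_neg_one_append_singleton]
      exact ih p (c + 1) done
    · have hcond : ¬ (done ++ [c] ≠ [] ∧ some v = some p) := by
        intro ⟨_, h⟩; exact hv (Option.some.inj h)
      simp only [rleLoop, runMerge, if_neg hcond, if_neg hv]
      rw [List.append_assoc] at *
      have := ih v 1 (done ++ [c])
      simpa using this

theorem runMerge_pm (ds : List Int) : ∀ (m c : Int),
    runMerge m c (pm m ds) = (c + (takeLen m ds : Int)) :: groupLens (ds.drop (takeLen m ds)) := by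
  induction ds with
  | nil => intro m c; simp [pm, runMerge, takeLen, groupLens_nil]
  | cons x xs ih =>
    intro m c
    by_cases h : x ≤ m
    · have hng : ¬ x > m := by omega
      simp only [pm, if_neg hng, runMerge]
      rw [ih m (c + 1)]
      simp only [takeLen, if_pos h, List.drop_succ_cons]
      congr 1
      push_cast; ring_nf
    · have hg : x > m := by omega
      have hne : x ≠ m := by omega
      simp only [pm, if_pos hg, runMerge, if_neg hne]
      rw [ih x 1]
      have hnle : ¬ x ≤ m := h
      simp only [takeLen, if_neg hnle, Nat.cast_zero, add_zero, List.drop_zero,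
        groupLens_cons]
      congr 2
      omega

theorem rle_lead_eq_groupLens (days : List Int) :
    rleLoop (leadLoop days (none, [])).2 none [] = groupLens days := by
  cases days with
  | nil => simp [leadLoop, rleLoop, groupLens_nil]
  | cons d ds =>
    simp only [leadLoop, List.nil_append]
    rw [leadLoop_snd ds d [d]]
    have hcons : [d] ++ pm d ds = d :: pm d ds := by simp
    rw [hcons]
    have hcond : ¬ (([] : List Int) ≠ [] ∧ some d = (none : Option Int)) := by
      intro ⟨h, _⟩; exact h rfl
    simp only [rleLoop, if_neg hcond, List.nil_append]
    have := rleLoop_inv (pm d ds) d 1 []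
    simp only [List.nil_append] at this
    rw [this, runMerge_pm ds d 1, groupLens_cons]
    congr 1
    omega

theorem days_eq (progresses speeds : List Int) (hlen : progresses.length ≤ speeds.length) :
    (List.range (progresses.map (fun p => 100 - p)).length).map
      (fun (i : Nat) => pyCeilDiv (PySem.List.pyGetD (progresses.map (fun p => 100 - p)) ((i : Nat) : Int) 0)
                          (PySem.List.pyGetD speeds ((i : Nat) : Int) 0))
      = (progresses.zip speeds).map (fun ps => pyCeilDiv (100 - ps.1) ps.2) := by
  apply List.ext_getElem
  · simp; omega
  · intro n h1 h2
    simp only [List.getElem_map, List.getElem_range, List.getElem_zip]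
    simp only [List.length_map, List.length_range] at h1
    have hn : n < progresses.length := h1
    have hns : n < speeds.length := by omega
    have e1 : PySem.List.pyGetD (progresses.map (fun p => 100 - p)) ((n : Nat) : Int) 0
        = 100 - progresses[n] := by
      simp [PySem.List.pyGetD_natCast, List.getD, List.getElem?_map,
        List.getElem?_eq_getElem hn]
    have e2 : PySem.List.pyGetD speeds ((n : Nat) : Int) 0 = speeds[n] := by
      simp [PySem.List.pyGetD_natCast, List.getD, List.getElem?_eq_getElem hns]
    rw [e1, e2]

-- ===== VERDICT (by name: the statement is the Claim_ definition above) =====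
theorem solution_spec : Claim_equal_solution := by
  intro progresses speeds _ hpre
  unfold Spec_solution solution solution_alt
  simp only []
  rw [days_eq progresses speeds hpre.1]
  have h1 := loopA_eq_groupLens ((progresses.zip speeds).map (fun ps => pyCeilDiv (100 - ps.1) ps.2))
  have h2 := rle_lead_eq_groupLens ((progresses.zip speeds).map (fun ps => pyCeilDiv (100 - ps.1) ps.2))
  simp only [finalizeA] at h1
  rw [h2]
  exact h1
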